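-- pv_equiv track=rewrite | github.com/ym1100/openflow | backend/flowy_deepagents/content_writer.py | _dedupe_image_filename
-- ===== SOURCE A (Python) =====
-- def _dedupe_image_filename(name: str) -> str:
--     """Fix doubled extensions like jacket-model.png.png from planner noise."""
--     n = name.strip()
--     if not n:
--         return n
--     lower = n.lower()
--     for ext in (".png", ".jpg", ".jpeg", ".webp", ".gif"):
--         doubled = ext + ext
--         if lower.endswith(doubled):
--             return n[: -len(ext)]
--     return n
-- ===== SOURCE B (Python) =====
-- def _dedupe_image_filename(name: str) -> str:
--     """Fix doubled extensions like jacket-model.png.png from planner noise."""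
--     n = name.strip()
--     parts = n.split('.')
--     if len(parts) >= 3:
--         last, prev = parts[-1].lower(), parts[-2].lower()
--         if last == prev and last in ('png', 'jpg', 'jpeg', 'webp', 'gif'):
--             return '.'.join(parts[:-1])
--     return n
-- ===== Notes on version B (the rewrite author's own statement) =====
-- stated objective: alternative
-- what changed: Instead of scanning five candidate extensions with an endswith test each, B splits the name into dot-separated segments once and compares the last two segments (case-folded) against the allowed tokens, rejoining all but the last segment on a match.
import Mathlib
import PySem

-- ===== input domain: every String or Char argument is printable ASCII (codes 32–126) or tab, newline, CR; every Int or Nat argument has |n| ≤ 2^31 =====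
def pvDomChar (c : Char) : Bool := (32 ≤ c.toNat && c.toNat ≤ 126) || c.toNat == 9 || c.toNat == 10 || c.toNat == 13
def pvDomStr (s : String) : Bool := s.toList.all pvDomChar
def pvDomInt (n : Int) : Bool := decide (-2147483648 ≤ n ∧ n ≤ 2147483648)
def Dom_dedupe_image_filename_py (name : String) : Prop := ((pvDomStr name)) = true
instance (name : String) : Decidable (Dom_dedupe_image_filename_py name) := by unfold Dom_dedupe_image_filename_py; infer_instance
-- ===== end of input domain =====

-- B replaces A's scan over five candidate extensions (an endswith test each) by one
-- split of the name into dot-separated segments, comparing the last two segments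
-- case-folded against the allowed tokens and rejoining all but the last (objective: alternative).
-- Both ports work on code points (List Char) via PySem.Chars; exact on the ASCII domain.

-- ===== PORT A =====
def pvExtsA : List (List Char) :=
  [['.','p','n','g'], ['.','j','p','g'], ['.','j','p','e','g'], ['.','w','e','b','p'], ['.','g','i','f']]

-- A's `for ext in (...)` loop, transliterated as structural recursion over the tuple.
def pvLoopA (n low : List Char) : List (List Char) → List Char
  | [] => n
  | ext :: rest =>
    if PySem.Chars.endswith low (ext ++ ext) then
      PySem.Chars.slice n none (some (-(ext.length : Int)))     -- n[: -len(ext)]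
    else pvLoopA n low rest

def dedupe_image_filename_py (name : String) : String :=
  let n := PySem.Chars.strip name.toList
  if n.length = 0 then String.ofList n                          -- `if not n: return n`
  else String.ofList (pvLoopA n (PySem.Chars.lower n) pvExtsA)

-- ===== PORT B =====
def pvTokens : List (List Char) :=
  [['p','n','g'], ['j','p','g'], ['j','p','e','g'], ['w','e','b','p'], ['g','i','f']]

-- B's body after the strip: split on '.', inspect the last two segments, rejoin parts[:-1].
def pvSplitPick (n : List Char) : List Char :=
  let parts := PySem.Chars.splitOn n ['.']                      -- parts = n.split('.')
  if 3 ≤ parts.length then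
    let last := PySem.Chars.lower ((PySem.List.pyGet? parts (-1)).getD [])   -- parts[-1].lower()
    let prev := PySem.Chars.lower ((PySem.List.pyGet? parts (-2)).getD [])   -- parts[-2].lower()
    if last = prev ∧ pvTokens.contains last = true then
      PySem.Chars.join ['.'] (PySem.List.slice parts none (some (-1)))       -- '.'.join(parts[:-1])
    else n
  else n

def dedupe_image_filename_py_alt (name : String) : String :=
  String.ofList (pvSplitPick (PySem.Chars.strip name.toList))

-- ===== PRECONDITION & SPEC =====
def Spec_dedupe_image_filename_py (name : String) (out : String) : Prop := out = dedupe_image_filename_py_alt name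
instance (name : String) (out : String) : Decidable (Spec_dedupe_image_filename_py name out) := by unfold Spec_dedupe_image_filename_py; infer_instance

-- ===== CLAIM (what is proved, stated in full; the proofs are below) =====
def Claim_equal_dedupe_image_filename_py : Prop := ∀ (name : String), Dom_dedupe_image_filename_py name → Spec_dedupe_image_filename_py name (dedupe_image_filename_py name)

-- ===== LEMMAS AND PROOFS =====

-- Reference splitter: str.split('.') as plain structural recursion.
def pvSplitD : List Char → List (List Char)
  | [] => [[]]
  | c :: rest => if c = '.' then [] :: pvSplitD rest else (pvSplitD rest).modifyHead (c :: ·)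

lemma pvSplitD_dot (rest : List Char) : pvSplitD ('.' :: rest) = [] :: pvSplitD rest := by
  simp [pvSplitD]

lemma pvSplitD_cons (c : Char) (rest : List Char) (hc : c ≠ '.') :
    pvSplitD (c :: rest) = (pvSplitD rest).modifyHead (c :: ·) := by
  simp [pvSplitD, hc]

lemma pvSplitD_ne_nil (l : List Char) : pvSplitD l ≠ [] := by
  induction l with
  | nil => simp [pvSplitD]
  | cons c rest ih =>
    by_cases hc : c = '.'
    · subst hc; rw [pvSplitD_dot]; simp
    · rw [pvSplitD_cons c rest hc]
      cases h : pvSplitD rest with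
      | nil => exact absurd h ih
      | cons a b => simp

lemma pvSplitD_no_dot (l : List Char) (h : '.' ∉ l) : pvSplitD l = [l] := by
  induction l with
  | nil => rfl
  | cons c rest ih =>
    simp only [List.mem_cons, not_or] at h
    rw [pvSplitD_cons c rest (fun hc => h.1 hc.symm), ih h.2]
    rfl

lemma pvSplitD_append_dot (x y : List Char) :
    pvSplitD (x ++ '.' :: y) = pvSplitD x ++ pvSplitD y := by
  induction x with
  | nil => simp [pvSplitD_dot, pvSplitD]
  | cons c x ih =>
    by_cases hc : c = '.'
    · subst hc
      rw [List.cons_append, pvSplitD_dot, pvSplitD_dot, ih, List.cons_append]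
    · rw [List.cons_append, pvSplitD_cons c _ hc, pvSplitD_cons c x hc, ih]
      cases h : pvSplitD x with
      | nil => exact absurd h (pvSplitD_ne_nil x)
      | cons a b => simp

lemma pvIntercalate_splitD (l : List Char) : List.intercalate ['.'] (pvSplitD l) = l := by
  induction l with
  | nil => rfl
  | cons c rest ih =>
    by_cases hc : c = '.'
    · subst hc
      rw [pvSplitD_dot]
      cases h : pvSplitD rest with
      | nil => exact absurd h (pvSplitD_ne_nil rest)
      | cons a b => rw [h] at ih; simpa [List.intercalate] using ih
    · rw [pvSplitD_cons c rest hc]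
      cases h : pvSplitD rest with
      | nil => exact absurd h (pvSplitD_ne_nil rest)
      | cons a b =>
        rw [h] at ih
        cases b with
        | nil => simpa [List.intercalate, List.modifyHead] using congrArg (c :: ·) ih
        | cons b1 b2 =>
          simp only [List.modifyHead]
          simp [List.intercalate] at ih ⊢
          simpa using congrArg (c :: ·) ih

lemma pvIntercalate_snoc (P : List (List Char)) (hP : P ≠ []) (a : List Char) :
    List.intercalate ['.'] (P ++ [a]) = List.intercalate ['.'] P ++ '.' :: a := by
  induction P with
  | nil => exact absurd rfl hP
  | cons x P ih =>
    cases P with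
    | nil => simp [List.intercalate]
    | cons y Q =>
      have := ih (by simp)
      simp only [List.cons_append]
      simp [List.intercalate] at this ⊢
      simpa using congrArg (x ++ '.' :: ·) this

-- splitOn.go computes pvSplitD (given enough fuel).
lemma pvGoSpec (fuel : Nat) : ∀ (l cur : List Char) (acc : List (List Char)),
    l.length < fuel →
    PySem.Chars.splitOn.go ['.'] fuel l cur acc
      = acc.reverse ++ (pvSplitD l).modifyHead (cur.reverse ++ ·) := by
  induction fuel with
  | zero => intro l cur acc h; omega
  | succ f ih =>
    intro l cur acc h
    cases l with
    | nil =>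
      rw [PySem.Chars.splitOn.go]
      · simp [pvSplitD, List.modifyHead]
      · omega
    | cons c rest =>
      rw [PySem.Chars.splitOn.go]
      by_cases hc : c = '.'
      · subst hc
        have hpre : List.isPrefixOf ['.'] ('.' :: rest) = true := by simp [List.isPrefixOf]
        simp only [hpre, if_true]
        have hdrop : List.drop (['.'] : List Char).length ('.' :: rest) = rest := by simp
        rw [hdrop, ih rest [] (cur.reverse :: acc) (by simpa using Nat.lt_of_succ_lt_succ h)]
        rw [pvSplitD_dot]
        cases hsp : pvSplitD rest with
        | nil => exact absurd hsp (pvSplitD_ne_nil rest)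
        | cons a b => simp
      · have hpre : List.isPrefixOf ['.'] (c :: rest) = false := by
          simp [List.isPrefixOf, BEq.beq]
          intro hc'; exact absurd hc'.symm hc
        simp only [hpre]
        simp only [Bool.false_eq_true, if_false]
        rw [ih rest (c :: cur) acc (by simpa using Nat.lt_of_succ_lt_succ h)]
        rw [pvSplitD_cons c rest hc]
        cases hsp : pvSplitD rest with
        | nil => exact absurd hsp (pvSplitD_ne_nil rest)
        | cons a b => simp

lemma pvSplitOn_eq (l : List Char) : PySem.Chars.splitOn l ['.'] = pvSplitD l := by
  unfold PySem.Chars.splitOn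
  rw [pvGoSpec (l.length + 1) l [] [] (by omega)]
  cases h : pvSplitD l with
  | nil => exact absurd h (pvSplitD_ne_nil l)
  | cons a b => simp [List.modifyHead]

lemma pvLowerChar_dot_iff (c : Char) : PySem.Chars.lowerChar c = '.' ↔ c = '.' := by
  constructor
  · intro hcon
    by_cases hup : PySem.Chars.isupper c = true
    · exfalso
      have hup' := hup
      unfold PySem.Chars.isupper at hup'
      simp only [Bool.and_eq_true, decide_eq_true_eq, Char.le_def] at hup'
      unfold PySem.Chars.lowerChar at hcon
      rw [if_pos hup] at hcon
      have h1 : 65 ≤ c.toNat := hup'.1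
      have h2 : c.toNat ≤ 90 := hup'.2
      have hv : (Char.ofNat (c.toNat + 32)).toNat = c.toNat + 32 := by
        rw [Char.toNat_ofNat, if_pos]
        left; omega
      have h46 : c.toNat + 32 = 46 := by
        have := congrArg Char.toNat hcon
        rw [hv] at this
        exact this
      omega
    · unfold PySem.Chars.lowerChar at hcon
      rwa [if_neg hup] at hcon
  · intro h
    subst h
    decide

lemma pvSplitD_lower (l : List Char) :
    pvSplitD (PySem.Chars.lower l) = (pvSplitD l).map PySem.Chars.lower := by
  induction l with
  | nil => rfl
  | cons c rest ih =>
    have hmap : PySem.Chars.lower (c :: rest) = PySem.Chars.lowerChar c :: PySem.Chars.lower rest := rfl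
    rw [hmap]
    by_cases hc : c = '.'
    · subst hc
      have : PySem.Chars.lowerChar '.' = '.' := by decide
      rw [this]
      unfold pvSplitD
      rw [if_pos rfl, if_pos rfl, ih]
      rfl
    · have hlc : PySem.Chars.lowerChar c ≠ '.' := fun h => hc ((pvLowerChar_dot_iff c).mp h)
      unfold pvSplitD
      rw [if_neg hlc, if_neg hc, ih]
      cases h : pvSplitD rest with
      | nil => exact absurd h (pvSplitD_ne_nil rest)
      | cons a b => simp [List.modifyHead, PySem.Chars.lower]

lemma pvLower_append (a b : List Char) :
    PySem.Chars.lower (a ++ b) = PySem.Chars.lower a ++ PySem.Chars.lower b := by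
  simp [PySem.Chars.lower]

-- (⇐) a nonempty prefix of parts and two equal lowered tail segments give A's suffix.
lemma pvEndswith_of_parts (n : List Char) (P : List (List Char)) (p1 p2 t : List Char)
    (hP : pvSplitD n = P ++ [p1, p2]) (hPne : P ≠ [])
    (h1 : PySem.Chars.lower p1 = t) (h2 : PySem.Chars.lower p2 = t) :
    PySem.Chars.endswith (PySem.Chars.lower n) (('.' :: t) ++ ('.' :: t)) = true := by
  have hn : n = List.intercalate ['.'] (P ++ [p1, p2]) := by
    rw [← hP, pvIntercalate_splitD]
  have hsplit : List.intercalate ['.'] (P ++ [p1, p2])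
      = List.intercalate ['.'] P ++ ('.' :: p1 ++ '.' :: p2) := by
    have e1 : (P ++ [p1, p2]) = (P ++ [p1]) ++ [p2] := by simp
    rw [e1, pvIntercalate_snoc (P ++ [p1]) (by simp) p2, pvIntercalate_snoc P hPne p1]
    simp
  rw [PySem.Chars.endswith_iff]
  refine ⟨PySem.Chars.lower (List.intercalate ['.'] P), ?_⟩
  rw [hn, hsplit, pvLower_append]
  congr 1
  have hd : PySem.Chars.lowerChar '.' = '.' := by decide
  simp only [PySem.Chars.lower, List.map_cons, List.map_append, hd] at h1 h2 ⊢
  rw [h1, h2]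

-- generic: a map equation with a length-2 tail decomposes the list.
lemma pvDecomp (L Q T : List (List Char)) (f : List Char → List Char)
    (hsd : L.map f = Q ++ T) (hT : T.length = 2) :
    ∃ P p1 p2, L = P ++ [p1, p2] ∧ P.length = Q.length ∧
      f p1 = T[0]'(by omega) ∧ f p2 = T[1]'(by omega) := by
  have hlen : L.length = Q.length + 2 := by
    have := congrArg List.length hsd
    simp at this; omega
  refine ⟨L.take Q.length, L[Q.length]'(by omega), L[Q.length+1]'(by omega), ?_, by simp; omega, ?_, ?_⟩
  · conv_lhs => rw [← List.take_append_drop Q.length L]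
    congr 1
    apply List.ext_getElem
    · simp; omega
    · intro i h1 h2
      simp only [List.getElem_drop]
      have : i < 2 := by simp at h1; omega
      interval_cases i <;> simp
  · have := congrArg (fun l => l[Q.length]?) hsd
    simp only [List.getElem?_map] at this
    rw [List.getElem?_append_right (le_refl _)] at this
    simp only [Nat.sub_self] at this
    rw [List.getElem?_eq_getElem (by omega)] at this
    rw [List.getElem?_eq_getElem (by omega)] at this
    simp at this
    exact this
  · have := congrArg (fun l => l[Q.length + 1]?) hsd
    simp only [List.getElem?_map] at this
    rw [List.getElem?_append_right (by omega)] at this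
    simp only [Nat.add_sub_cancel_left] at this
    rw [List.getElem?_eq_getElem (by omega)] at this
    rw [List.getElem?_eq_getElem (by omega)] at this
    simp at this
    exact this

-- (⇒) A's suffix forces the last two segments of parts to lower to t.
lemma pvParts_of_endswith (n t : List Char) (hnd : '.' ∉ t)
    (h : PySem.Chars.endswith (PySem.Chars.lower n) (('.' :: t) ++ ('.' :: t)) = true) :
    ∃ P p1 p2, pvSplitD n = P ++ [p1, p2] ∧ P ≠ [] ∧
      PySem.Chars.lower p1 = t ∧ PySem.Chars.lower p2 = t := by
  obtain ⟨pre, hpre⟩ := (PySem.Chars.endswith_iff _ _).mp h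
  have hlow : PySem.Chars.lower n = pre ++ '.' :: (t ++ '.' :: t) := by
    rw [← hpre]; simp
  have hsd : (pvSplitD n).map PySem.Chars.lower = pvSplitD pre ++ [t, t] := by
    rw [← pvSplitD_lower, hlow, pvSplitD_append_dot, pvSplitD_append_dot, pvSplitD_no_dot t hnd]
    rfl
  obtain ⟨P, p1, p2, hdec, hlenP, h1, h2⟩ :=
    pvDecomp (pvSplitD n) (pvSplitD pre) [t, t] PySem.Chars.lower hsd rfl
  refine ⟨P, p1, p2, hdec, ?_, by simpa using h1, by simpa using h2⟩
  intro hcon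
  rw [hcon] at hlenP
  exact pvSplitD_ne_nil pre (List.length_eq_zero_iff.mp hlenP.symm)

-- evaluation helpers for B on parts = P ++ [p1, p2]
lemma pvGet_neg1 (P : List (List Char)) (p1 p2 : List Char) :
    PySem.List.pyGet? (P ++ [p1, p2]) (-1) = some p2 := by
  simp [PySem.List.pyGet?, PySem.List.pyIdx?]

lemma pvGet_neg2 (P : List (List Char)) (p1 p2 : List Char) :
    PySem.List.pyGet? (P ++ [p1, p2]) (-2) = some p1 := by
  simp [PySem.List.pyGet?, PySem.List.pyIdx?]

lemma pvSlice_drop_last {α : Type} (P : List α) (a : α) :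
    PySem.List.slice (P ++ [a]) none (some (-1)) = P := by
  simp [PySem.List.slice, PySem.List.clampIdx]

lemma pvSlice_neg_suffix (a b : List Char) (hb : b ≠ []) :
    PySem.Chars.slice (a ++ b) none (some (-(b.length : Int))) = a := by
  have hbpos : 0 < b.length := List.length_pos_iff.mpr hb
  rw [PySem.Chars.slice_eq_listSlice]
  simp [PySem.List.slice, PySem.List.clampIdx]
  rw [if_pos hbpos, if_neg (by omega)]
  simp

lemma pvLower_length (l : List Char) : (PySem.Chars.lower l).length = l.length := by
  simp [PySem.Chars.lower]

-- B's branch fires exactly as A's endswith for ext '.'::t; outputs agree.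
lemma pvPick_pos (n t : List Char) (hnd : '.' ∉ t) (htok : t ∈ pvTokens)
    (h : PySem.Chars.endswith (PySem.Chars.lower n) (('.' :: t) ++ ('.' :: t)) = true) :
    pvSplitPick n = PySem.Chars.slice n none (some (-(('.' :: t).length : Int))) := by
  obtain ⟨P, p1, p2, hP, hPne, h1, h2⟩ := pvParts_of_endswith n t hnd h
  have hp : 0 < P.length := List.length_pos_iff.mpr hPne
  unfold pvSplitPick
  rw [pvSplitOn_eq, hP]
  rw [if_pos (show 3 ≤ (P ++ [p1, p2]).length by simp; omega)]
  simp only [pvGet_neg1, pvGet_neg2, Option.getD_some]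
  rw [if_pos ⟨by rw [h1, h2], by rw [h2]; exact List.contains_iff_mem.mpr htok⟩]
  have hsnoc : (P ++ [p1, p2]) = (P ++ [p1]) ++ [p2] := by simp
  rw [hsnoc, pvSlice_drop_last]
  have hn : n = List.intercalate ['.'] (P ++ [p1]) ++ '.' :: p2 := by
    have := pvIntercalate_splitD n
    rw [hP, hsnoc, pvIntercalate_snoc (P ++ [p1]) (by simp) p2] at this
    exact this.symm
  have hlen : (('.' :: t).length : Int) = (('.' :: p2).length : Int) := by
    have : p2.length = t.length := by rw [← h2, pvLower_length]
    simp [this]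
  rw [hlen]
  conv_rhs => rw [hn]
  rw [pvSlice_neg_suffix _ _ (by simp)]
  rfl

-- if no extension matched, B leaves n unchanged too.
lemma pvPick_neg (n : List Char)
    (h : ∀ t ∈ pvTokens, PySem.Chars.endswith (PySem.Chars.lower n) (('.' :: t) ++ ('.' :: t)) = false) :
    pvSplitPick n = n := by
  unfold pvSplitPick
  rw [pvSplitOn_eq]
  by_cases hlen : 3 ≤ (pvSplitD n).length
  · rw [if_pos hlen]
    show (if PySem.Chars.lower ((PySem.List.pyGet? (pvSplitD n) (-1)).getD [])
            = PySem.Chars.lower ((PySem.List.pyGet? (pvSplitD n) (-2)).getD [])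
          ∧ pvTokens.contains (PySem.Chars.lower ((PySem.List.pyGet? (pvSplitD n) (-1)).getD [])) = true then
        PySem.Chars.join ['.'] (PySem.List.slice (pvSplitD n) none (some (-1)))
      else n) = n
    split
    · rename_i hcond
      exfalso
      obtain ⟨P, p1, p2, hdec⟩ : ∃ P p1 p2, pvSplitD n = P ++ [p1, p2] := by
        rcases hrev : (pvSplitD n).reverse with _ | ⟨a, tl⟩
        · have hl : (pvSplitD n).length = 0 := by
            rw [← List.length_reverse, hrev]; rfl
          omega
        · rcases tl with _ | ⟨b, tl2⟩
          · have hl : (pvSplitD n).length = 1 := by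
              rw [← List.length_reverse, hrev]; rfl
            omega
          · refine ⟨tl2.reverse, b, a, ?_⟩
            have := congrArg List.reverse hrev
            simp at this
            rw [this]
      have hPne : P ≠ [] := by
        intro hcon
        rw [hdec, hcon] at hlen
        simp at hlen
      rw [hdec, pvGet_neg1, pvGet_neg2] at hcond
      simp only [Option.getD_some] at hcond
      obtain ⟨heq, hmem⟩ := hcond
      have htok : PySem.Chars.lower p2 ∈ pvTokens := List.contains_iff_mem.mp hmem
      have := pvEndswith_of_parts n P p1 p2 (PySem.Chars.lower p2)
        (by rw [← hdec]) hPne heq.symm rfl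
      rw [h _ htok] at this
      exact Bool.false_ne_true this
    · rfl
  · rw [if_neg hlen]

-- the five-way case split connecting A's loop to B's pick
lemma pv_core (n : List Char) : pvLoopA n (PySem.Chars.lower n) pvExtsA = pvSplitPick n := by
  by_cases h1 : PySem.Chars.endswith (PySem.Chars.lower n) ['.','p','n','g','.','p','n','g'] = true
  · rw [pvPick_pos n ['p','n','g'] (by decide) (by decide) (by simpa using h1)]
    simp [pvLoopA, pvExtsA, h1]
  · by_cases h2 : PySem.Chars.endswith (PySem.Chars.lower n) ['.','j','p','g','.','j','p','g'] = true
    · rw [pvPick_pos n ['j','p','g'] (by decide) (by decide) (by simpa using h2)]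
      simp [pvLoopA, pvExtsA, h1, h2]
    · by_cases h3 : PySem.Chars.endswith (PySem.Chars.lower n) ['.','j','p','e','g','.','j','p','e','g'] = true
      · rw [pvPick_pos n ['j','p','e','g'] (by decide) (by decide) (by simpa using h3)]
        simp [pvLoopA, pvExtsA, h1, h2, h3]
      · by_cases h4 : PySem.Chars.endswith (PySem.Chars.lower n) ['.','w','e','b','p','.','w','e','b','p'] = true
        · rw [pvPick_pos n ['w','e','b','p'] (by decide) (by decide) (by simpa using h4)]
          simp [pvLoopA, pvExtsA, h1, h2, h3, h4]
        · by_cases h5 : PySem.Chars.endswith (PySem.Chars.lower n) ['.','g','i','f','.','g','i','f'] = true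
          · rw [pvPick_pos n ['g','i','f'] (by decide) (by decide) (by simpa using h5)]
            simp [pvLoopA, pvExtsA, h1, h2, h3, h4, h5]
          · have hA : pvLoopA n (PySem.Chars.lower n) pvExtsA = n := by
              simp [pvLoopA, pvExtsA, h1, h2, h3, h4, h5]
            rw [hA, pvPick_neg]
            intro t ht
            fin_cases ht <;> simp_all
    
-- ===== VERDICT (by name: the statement is the Claim_ definition above) =====
theorem dedupe_image_filename_py_spec : Claim_equal_dedupe_image_filename_py := by
  intro name _
  unfold Spec_dedupe_image_filename_py dedupe_image_filename_py dedupe_image_filename_py_alt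
  by_cases hn : (PySem.Chars.strip name.toList).length = 0
  · have : PySem.Chars.strip name.toList = [] := List.length_eq_zero_iff.mp hn
    simp [this]
    decide
  · simp [hn, pv_core]
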